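-- pv_equiv track=rewrite | github.com/Itz-Prasad/Slug_Making_Function | slugmaker.py | Slug_Maker
-- ===== SOURCE A (Python) =====
-- def Slug_Maker(Title): #Takes title as argument
--     try:
--         Splitted_Title = Title.split(" ")  # Splits words apart which have spaces within
--
--         Lower_Case_Title = [items.lower() for items in Splitted_Title]  # Gives list of words in lower case
--
--         Slug = ("-").join(Lower_Case_Title)  # Joins words in list with "-" to make a slug
--         return Slug
--     except:
--         return Title
-- ===== SOURCE B (Python) =====
-- def Slug_Maker(Title): #Takes title as argument
--     try:
--         # one pass over the characters: spaces become hyphens, everything else lowercased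
--         return "".join("-" if ch == " " else ch.lower() for ch in Title)
--     except:
--         return Title
-- ===== Notes on version B (the rewrite author's own statement) =====
-- stated objective: simpler
-- what changed: Replaces A's split-on-space / per-word-lowercase list comprehension / hyphen-join pipeline with a single character-wise pass that maps each space to a hyphen and lowercases every other character, with no intermediate list of words.
import Mathlib
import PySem

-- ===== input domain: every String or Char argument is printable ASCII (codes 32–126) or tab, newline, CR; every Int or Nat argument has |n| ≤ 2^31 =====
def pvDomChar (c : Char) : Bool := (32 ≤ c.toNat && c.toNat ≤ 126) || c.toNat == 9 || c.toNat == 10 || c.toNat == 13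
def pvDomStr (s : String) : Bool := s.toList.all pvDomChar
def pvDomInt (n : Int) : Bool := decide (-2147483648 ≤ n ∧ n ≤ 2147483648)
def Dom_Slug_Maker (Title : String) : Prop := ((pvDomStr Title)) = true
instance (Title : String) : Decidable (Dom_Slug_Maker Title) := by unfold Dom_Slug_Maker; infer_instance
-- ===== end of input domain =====

-- B replaces A's split / per-word-lower / join pipeline with one character-wise pass (simpler, same cost).
-- The bare `except: return Title` only fires for non-string arguments, which the String type excludes here.

-- ===== PORT A =====
def Slug_Maker (Title : String) : String :=
  -- Splitted_Title = Title.split(" ")  (sep " " is nonempty, so split? always returns some)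
  let Splitted_Title : List String := (PySem.Str.split? Title " ").getD []
  -- Lower_Case_Title = [items.lower() for items in Splitted_Title]
  let Lower_Case_Title : List String := Splitted_Title.map PySem.Str.lower
  -- Slug = ("-").join(Lower_Case_Title)
  PySem.Str.join "-" Lower_Case_Title

-- ===== PORT B =====
def Slug_Maker_alt (Title : String) : String :=
  String.ofList (Title.toList.map (fun ch => if ch = ' ' then '-' else PySem.Chars.lowerChar ch))

-- ===== PRECONDITION & SPEC =====
def Spec_Slug_Maker (Title : String) (out : String) : Prop := out = Slug_Maker_alt Title
instance (Title : String) (out : String) : Decidable (Spec_Slug_Maker Title out) := by unfold Spec_Slug_Maker; infer_instance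

-- ===== CLAIM (what is proved, stated in full; the proofs are below) =====
def Claim_equal_Slug_Maker : Prop := ∀ (Title : String), Dom_Slug_Maker Title → Spec_Slug_Maker Title (Slug_Maker Title)

-- ===== LEMMAS AND PROOFS =====

-- reference recursion equal to PySem.Chars.splitOn.go with sep = [' '] and enough fuel
def mySplit : List Char → List Char → List (List Char) → List (List Char)
  | [], cur, acc => (cur.reverse :: acc).reverse
  | c :: rest, cur, acc =>
      if c = ' ' then mySplit rest [] (cur.reverse :: acc) else mySplit rest (c :: cur) acc

theorem splitOn_go_eq (l : List Char) : ∀ (fuel : Nat), l.length ≤ fuel →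
    ∀ (cur : List Char) (acc : List (List Char)),
    PySem.Chars.splitOn.go [' '] fuel l cur acc = mySplit l cur acc := by
  induction l with
  | nil =>
      intro fuel _ cur acc
      cases fuel <;> simp [PySem.Chars.splitOn.go, mySplit]
  | cons c rest ih =>
      intro fuel hf cur acc
      cases fuel with
      | zero => simp at hf
      | succ f =>
        by_cases hc : c = ' '
        · subst hc
          simpa [PySem.Chars.splitOn.go, mySplit, List.isPrefixOf] using
            ih f (by simpa using hf) [] (cur.reverse :: acc)
        · have hc' : ¬ (' ' = c) := fun h => hc h.symm
          simpa [PySem.Chars.splitOn.go, mySplit, List.isPrefixOf, hc, hc'] using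
            ih f (by simpa using hf) (c :: cur) acc

def gMap (c : Char) : Char := if c = ' ' then '-' else c

theorem join_append_singleton (xs : List (List Char)) (y : List Char) :
    PySem.Chars.join ['-'] (xs ++ [y]) = (xs.map (· ++ ['-'])).flatten ++ y := by
  induction xs with
  | nil => simp [PySem.Chars.join, List.intercalate]
  | cons x xs ih =>
      cases xs with
      | nil => simp [PySem.Chars.join, List.intercalate, List.intersperse]
      | cons z zs =>
          have h := PySem.Chars.join_cons_cons (sep := ['-']) (p := x)
            (q := z) (rest := zs ++ [y])
          simp only [List.cons_append] at *
          rw [h, ih]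
          simp

theorem mySplit_join (l : List Char) : ∀ (cur : List Char) (acc : List (List Char)),
    PySem.Chars.join ['-'] (mySplit l cur acc) =
      ((acc.reverse.map (· ++ ['-'])).flatten) ++ cur.reverse ++ l.map gMap := by
  induction l with
  | nil =>
      intro cur acc
      have : (cur.reverse :: acc).reverse = acc.reverse ++ [cur.reverse] := by simp
      simp [mySplit, this, join_append_singleton]
  | cons c rest ih =>
      intro cur acc
      by_cases hc : c = ' '
      · subst hc
        have hstep : mySplit (' ' :: rest) cur acc = mySplit rest [] (cur.reverse :: acc) := by
          simp [mySplit]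
        rw [hstep, ih [] (cur.reverse :: acc)]
        simp [gMap]
      · rw [show mySplit (c :: rest) cur acc = mySplit rest (c :: cur) acc
              from by simp [mySplit, hc]]
        rw [ih (c :: cur) acc]
        simp [gMap, hc]

theorem join_split (cs : List Char) :
    PySem.Chars.join ['-'] (PySem.Chars.splitOn cs [' ']) = cs.map gMap := by
  unfold PySem.Chars.splitOn
  rw [splitOn_go_eq cs (cs.length + 1) (by omega) [] []]
  simpa using mySplit_join cs [] []

theorem lower_join (parts : List (List Char)) :
    PySem.Chars.join ['-'] (parts.map PySem.Chars.lower) =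
      PySem.Chars.lower (PySem.Chars.join ['-'] parts) := by
  induction parts with
  | nil => simp [PySem.Chars.join, List.intercalate, PySem.Chars.lower]
  | cons x xs ih =>
      cases xs with
      | nil => simp [PySem.Chars.join, List.intercalate, List.intersperse]
      | cons z zs =>
          rw [List.map_cons, List.map_cons,
            PySem.Chars.join_cons_cons, PySem.Chars.join_cons_cons, ← List.map_cons,
            ih]
          simp [PySem.Chars.lower]
          decide

-- ===== VERDICT (by name: the statement is the Claim_ definition above) =====
theorem Slug_Maker_spec : Claim_equal_Slug_Maker := by
  intro Title _
  show Slug_Maker Title = Slug_Maker_alt Title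
  have hsep : (" " : String).toList = [' '] := by decide
  have hdash : ("-" : String).toList = ['-'] := by decide
  unfold Slug_Maker Slug_Maker_alt
  simp only [PySem.Str.split?, PySem.Chars.split?, PySem.Str.join, hsep, hdash]
  simp only [List.isEmpty_cons, Bool.false_eq_true, if_false, Option.map_some, Option.getD_some]
  congr 1
  rw [List.map_map, List.map_map]
  calc PySem.Chars.join ['-']
        ((PySem.Chars.splitOn Title.toList [' ']).map
          (String.toList ∘ PySem.Str.lower ∘ String.ofList))
      = PySem.Chars.join ['-']
        ((PySem.Chars.splitOn Title.toList [' ']).map PySem.Chars.lower) := by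
        have hfun : (String.toList ∘ PySem.Str.lower ∘ String.ofList) = PySem.Chars.lower := by
          funext x
          simp [Function.comp, PySem.Str.lower]
        rw [hfun]
    _ = PySem.Chars.lower (PySem.Chars.join ['-'] (PySem.Chars.splitOn Title.toList [' '])) :=
        lower_join _
    _ = PySem.Chars.lower (Title.toList.map gMap) := by rw [join_split]
    _ = Title.toList.map (fun ch => if ch = ' ' then '-' else PySem.Chars.lowerChar ch) := by
        simp only [PySem.Chars.lower, List.map_map]
        congr 1
        funext c
        by_cases hc : c = ' ' <;> simp [Function.comp, gMap, hc]
        decide
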